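-- pv_equiv track=rewrite | github.com/alexagedah/astro-ml | astroml/preprocessing/DEPR/dimension_reduction.py | remove_feature_map_dimensions
-- ===== SOURCE A (Python) =====
-- def remove_feature_map_dimensions(feature_map):
--     """
--     Remove B_z and v_z for the feature map and correct the indices
--
--     Parameters
--     ----------
--     feature_map : dictionary of {int:str}
--         Dictionary indicating which features are at which index in the matrix of
--         predictors
--
--     Returns
--     -------
--     adjusted_feature_map : dictionary of {int:str}
--         Dictionary indicating which features are at which index in the matrix of
--         predictors, adjusted for the dimension reduction
--     """
--     adjusted_feature_map = {}
--     for index, feature in feature_map.items():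
--         # Make no adjustment to B_x and B_y
--         if index < 2:
--             adjusted_feature_map[index] = feature
--         # Reduce index of p, rho, v_x and v_y by 1
--         elif index >=3 and index < 7:
--             adjusted_feature_map[index-1] = feature
--         # Reduce index of everyting after v_z by 2
--         elif index >= 8:
--             adjusted_feature_map[index-2] = feature
--     return adjusted_feature_map
-- ===== SOURCE B (Python) =====
-- def _delete_dimension(feature_map, d):
--     """Remove index d from the feature map and close the gap (indices above d drop by 1)."""
--     return {(i if i < d else i - 1): f for i, f in feature_map.items() if i != d}
--
-- def remove_feature_map_dimensions(feature_map):
--     # Delete dimension 7 (v_z) first, then dimension 2 (B_z): two staged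
--     # single-dimension deletions compose to the same renumbering.
--     return _delete_dimension(_delete_dimension(feature_map, 7), 2)
-- ===== Notes on version B (the rewrite author's own statement) =====
-- stated objective: simpler
-- what changed: B replaces A's single pass with a hand-written if/elif range ladder by composing two applications of a generic single-dimension deletion (delete index 7, then index 2), each a uniform filter-and-shift comprehension.
import Mathlib
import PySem

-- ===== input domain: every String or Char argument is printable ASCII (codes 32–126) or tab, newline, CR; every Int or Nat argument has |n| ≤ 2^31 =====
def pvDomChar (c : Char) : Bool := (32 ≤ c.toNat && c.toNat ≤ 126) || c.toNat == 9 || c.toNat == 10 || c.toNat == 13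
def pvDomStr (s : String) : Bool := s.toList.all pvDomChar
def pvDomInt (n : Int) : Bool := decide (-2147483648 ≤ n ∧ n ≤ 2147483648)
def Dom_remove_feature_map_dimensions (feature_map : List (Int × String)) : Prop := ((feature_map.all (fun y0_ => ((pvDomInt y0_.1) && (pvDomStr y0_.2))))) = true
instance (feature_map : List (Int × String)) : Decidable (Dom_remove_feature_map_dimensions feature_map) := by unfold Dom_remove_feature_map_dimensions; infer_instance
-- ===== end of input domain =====

-- B re-implements A as the composition of two generic single-dimension deletions
-- (delete index 7, then index 2), replacing A's hand-written if/elif range ladder (simpler).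


-- ===== PORT A =====
-- one loop-body step of A's for-loop (if/elif ladder over index ranges)
def pvStepA (acc : PySem.Dict Int String) (p : Int × String) : PySem.Dict Int String :=
  if p.1 < 2 then acc.insert p.1 p.2
  else if 3 ≤ p.1 ∧ p.1 < 7 then acc.insert (p.1 - 1) p.2
  else if 8 ≤ p.1 then acc.insert (p.1 - 2) p.2
  else acc

def remove_feature_map_dimensions (feature_map : List (Int × String)) : List (Int × String) :=
  (((PySem.Dict.ofList feature_map).items).foldl pvStepA PySem.Dict.empty).items

-- ===== PORT B =====
-- _delete_dimension: drop key d, close the gap (comprehension ported as a fold building a dict)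
def pvDeleteDim (fm : PySem.Dict Int String) (d : Int) : PySem.Dict Int String :=
  fm.items.foldl
    (fun acc p => if p.1 ≠ d then acc.insert (if p.1 < d then p.1 else p.1 - 1) p.2 else acc)
    PySem.Dict.empty

def remove_feature_map_dimensions_alt (feature_map : List (Int × String)) : List (Int × String) :=
  (pvDeleteDim (pvDeleteDim (PySem.Dict.ofList feature_map) 7) 2).items

-- ===== PRECONDITION & SPEC =====
def Spec_remove_feature_map_dimensions (feature_map : List (Int × String)) (out : List (Int × String)) : Prop := out = remove_feature_map_dimensions_alt feature_map
instance (feature_map : List (Int × String)) (out : List (Int × String)) : Decidable (Spec_remove_feature_map_dimensions feature_map out) := by unfold Spec_remove_feature_map_dimensions; infer_instance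

-- ===== CLAIM =====
def Claim_equal_remove_feature_map_dimensions : Prop := ∀ (feature_map : List (Int × String)), Dom_remove_feature_map_dimensions feature_map → Spec_remove_feature_map_dimensions feature_map (remove_feature_map_dimensions feature_map)

-- ===== LEMMAS AND PROOFS =====
-- A's ladder as a partial index map
def pvPhiA (i : Int) : Option Int :=
  if i < 2 then some i else if 3 ≤ i ∧ i < 7 then some (i - 1)
  else if 8 ≤ i then some (i - 2) else none

-- the index map of one deletion pass
def pvPhiDel (d i : Int) : Option Int :=
  if i ≠ d then some (if i < d then i else i - 1) else none

-- generic: folding "insert (φ key) value / skip" over a nodup-key list yields its filterMap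
theorem pv_items_gfold (φ : Int → Option Int)
    (hinj : ∀ a b x, φ a = some x → φ b = some x → a = b)
    (l : List (Int × String)) (hl : (l.map Prod.fst).Nodup) :
    (l.foldl (fun acc p => match (φ p.1).map (fun k => (k, p.2)) with
        | none => acc
        | some q => acc.insert q.1 q.2) PySem.Dict.empty).items
      = l.filterMap (fun p => (φ p.1).map (fun k => (k, p.2))) := by
  have hfold :
      (l.foldl (fun acc p => match (φ p.1).map (fun k => (k, p.2)) with
        | none => acc
        | some q => acc.insert q.1 q.2) PySem.Dict.empty)
      = (l.filterMap (fun p => (φ p.1).map (fun k => (k, p.2)))).foldl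
          (fun acc q => acc.insert q.1 q.2) PySem.Dict.empty := by
    rw [List.foldl_filterMap]
    congr 1
    funext acc p
    cases φ p.1 <;> rfl
  rw [hfold]
  have hnd : ((l.filterMap (fun p => (φ p.1).map (fun k => (k, p.2)))).map Prod.fst).Nodup := by
    have h1 : (l.filterMap (fun p => (φ p.1).map (fun k => (k, p.2)))).map Prod.fst
        = (l.map Prod.fst).filterMap φ := by
      simp [List.map_filterMap, List.filterMap_map, Option.map_map, Function.comp_def]
    rw [h1]
    exact hl.filterMap (fun a a' b hb hb' => hinj a a' b hb hb')
  have := PySem.Dict.items_foldl_insert_fresh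
      (l := l.filterMap (fun p => (φ p.1).map (fun k => (k, p.2))))
      (k := Prod.fst) (v := Prod.snd) (d := PySem.Dict.empty)
      (by intro a _; simp [pysem]) hnd
  simpa using this

theorem pvStepA_eq : pvStepA = (fun acc p =>
    match (pvPhiA p.1).map (fun k => (k, p.2)) with
    | none => acc
    | some q => acc.insert q.1 q.2) := by
  funext acc p
  simp only [pvStepA, pvPhiA]
  split_ifs <;> rfl

theorem pvStepDel_eq (d : Int) : (fun (acc : PySem.Dict Int String) (p : Int × String) =>
      if p.1 ≠ d then acc.insert (if p.1 < d then p.1 else p.1 - 1) p.2 else acc)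
    = (fun acc p =>
    match (pvPhiDel d p.1).map (fun k => (k, p.2)) with
    | none => acc
    | some q => acc.insert q.1 q.2) := by
  funext acc p
  simp only [pvPhiDel]
  split_ifs <;> rfl

theorem pvPhiA_inj : ∀ a b x, pvPhiA a = some x → pvPhiA b = some x → a = b := by
  intro a b x ha hb
  simp only [pvPhiA] at ha hb
  split_ifs at ha hb <;> simp_all <;> omega

theorem pvPhiDel_inj (d : Int) : ∀ a b x, pvPhiDel d a = some x → pvPhiDel d b = some x → a = b := by
  intro a b x ha hb
  simp only [pvPhiDel] at ha hb
  split_ifs at ha hb <;> simp_all <;> omega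

-- the two deletion maps compose to A's ladder
theorem pvPhi_comp : ∀ i, (pvPhiDel 7 i).bind (pvPhiDel 2) = pvPhiA i := by
  intro i
  simp only [pvPhiDel, pvPhiA]
  split_ifs <;> simp_all <;> omega

-- ===== VERDICT =====
theorem remove_feature_map_dimensions_spec : Claim_equal_remove_feature_map_dimensions := by
  intro fm _
  unfold Spec_remove_feature_map_dimensions remove_feature_map_dimensions remove_feature_map_dimensions_alt pvDeleteDim
  set L := (PySem.Dict.ofList fm).items with hL
  have hnd : (L.map Prod.fst).Nodup := PySem.Dict.nodup_keys_ofList fm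
  -- A's side
  rw [pvStepA_eq, pv_items_gfold pvPhiA pvPhiA_inj L hnd]
  -- B's inner pass
  rw [pvStepDel_eq 7]
  -- the inner dict's items
  have hinner := pv_items_gfold (pvPhiDel 7) (pvPhiDel_inj 7) L hnd
  rw [hinner]
  have hnd7 : ((L.filterMap (fun p => (pvPhiDel 7 p.1).map (fun k => (k, p.2)))).map Prod.fst).Nodup := by
    have h1 : (L.filterMap (fun p => (pvPhiDel 7 p.1).map (fun k => (k, p.2)))).map Prod.fst
        = (L.map Prod.fst).filterMap (pvPhiDel 7) := by
      simp [List.map_filterMap, List.filterMap_map, Option.map_map, Function.comp_def]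
    rw [h1]
    exact hnd.filterMap (fun a a' b hb hb' => pvPhiDel_inj 7 a a' b hb hb')
  rw [pvStepDel_eq 2, pv_items_gfold (pvPhiDel 2) (pvPhiDel_inj 2) _ hnd7]
  rw [List.filterMap_filterMap]
  apply List.filterMap_congr
  intro p _
  rw [← pvPhi_comp p.1]
  cases pvPhiDel 7 p.1 <;> simp
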